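-- pv_equiv track=rewrite | github.com/ziemowit141/CSP-LatinSquare | Piramids.py | max_possible_reversed
-- ===== SOURCE A (Python) =====
-- def piramid_checker(values):
--     prev = [0]
--     seen = 0
--     for val in values:
--         if val > max(prev):
--             seen += 1
--         prev.append(val)
--
--     return seen
--
-- def available_values(values):
--     available_values = [x for x in range(1, len(values) + 1)]
--     for val in values:
--         try:
--             available_values.remove(val)
--         except ValueError:
--             pass
--
--     return available_values
--
-- def max_possible_reversed(inserted):
--     count = piramid_checker(inserted)
--     if count is 0:
--         return 4
--
--     for val in available_values(inserted):
--         if val > max(inserted):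
--             count = 1
--         else:
--             count += 1
--
--     return count
-- ===== SOURCE B (Python) =====
-- def max_possible_reversed(inserted):
--     # One pass: running max + count of strict running-max records.
--     seen = 0
--     run = 0
--     for v in inserted:
--         if v > run:
--             seen += 1
--             run = v
--     if seen == 0:
--         return 4
--     n = len(inserted)
--     # Some available value exceeds max(inserted) iff n > max(inserted);
--     # A's loop then resets the count to 1.
--     if n > run:
--         return 1
--     s = set(inserted)
--     return seen + sum(1 for x in range(1, n + 1) if x not in s)
-- ===== Notes on version B (the rewrite author's own statement) =====
-- stated objective: faster
-- what changed: Replaced A's quadratic passes (max(prev) recomputed per element, list.remove per value, then a scan over the remaining available values with A's reset-to-1 rule) by one running-max pass, a set of the inserted values, and the closed-form observation that some available value exceeds max(inserted) iff len(inserted) > max(inserted), in which case the answer is 1.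
import Mathlib
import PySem

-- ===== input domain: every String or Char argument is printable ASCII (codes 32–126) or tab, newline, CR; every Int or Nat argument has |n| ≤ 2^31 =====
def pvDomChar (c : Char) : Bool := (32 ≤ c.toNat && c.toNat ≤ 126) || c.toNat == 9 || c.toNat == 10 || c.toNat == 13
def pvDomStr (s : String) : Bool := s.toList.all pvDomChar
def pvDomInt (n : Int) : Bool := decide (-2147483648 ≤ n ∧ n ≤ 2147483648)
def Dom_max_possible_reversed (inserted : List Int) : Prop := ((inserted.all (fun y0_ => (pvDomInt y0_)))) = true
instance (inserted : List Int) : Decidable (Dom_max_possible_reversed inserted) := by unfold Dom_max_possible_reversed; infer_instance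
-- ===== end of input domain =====

-- B replaces A's quadratic rescans (max(prev) per step, list.remove per value, a scan of
-- the available values) by one running-max pass, a set, and the closed-form test n > max.

-- ===== PORT A =====
def piramid_checker (values : List Int) : Int :=
  (values.foldl
    (fun (st : List Int × Int) val =>
      (st.1 ++ [val], if val > (PySem.List.max? st.1 (fun y => y)).getD 0 then st.2 + 1 else st.2))
    ([0], 0)).2

def available_values (values : List Int) : List Int :=
  values.foldl (fun acc val => (PySem.List.remove? acc val).getD acc)
    (PySem.List.pyRange 1 ((values.length : Int) + 1) 1)

def max_possible_reversed (inserted : List Int) : Int :=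
  let count := piramid_checker inserted
  if count = 0 then 4
  else
    (available_values inserted).foldl
      (fun count val =>
        if val > (PySem.List.max? inserted (fun y => y)).getD 0 then (1 : Int) else count + 1)
      count

-- ===== PORT B =====
def max_possible_reversed_alt (inserted : List Int) : Int :=
  let p := inserted.foldl (fun (p : Int × Int) v => if v > p.2 then (p.1 + 1, v) else p) (0, 0)
  if p.1 = 0 then 4
  else if (inserted.length : Int) > p.2 then 1
  else
    let s := PySem.Set.ofList inserted
    p.1 + (((PySem.List.pyRange 1 ((inserted.length : Int) + 1) 1).filter
              (fun x => !(PySem.Set.contains s x))).length : Int)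

-- ===== PRECONDITION & SPEC =====
def Spec_max_possible_reversed (inserted : List Int) (out : Int) : Prop := out = max_possible_reversed_alt inserted
instance (inserted : List Int) (out : Int) : Decidable (Spec_max_possible_reversed inserted out) := by unfold Spec_max_possible_reversed; infer_instance

-- ===== CLAIM (what is proved, stated in full; the proofs are below) =====
def Claim_equal_max_possible_reversed : Prop := ∀ (inserted : List Int), Dom_max_possible_reversed inserted → Spec_max_possible_reversed inserted (max_possible_reversed inserted)

-- ===== LEMMAS AND PROOFS =====

-- Python max of a nonempty list, defaulted (the default is never used on [] in our uses).
def pymax (l : List Int) : Int := (PySem.List.max? l (fun y => y)).getD 0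

theorem pymax_cons (x : Int) (t : List Int) : pymax (x :: t) = t.foldl max x := by
  simp [pymax, PySem.List.max?_id_cons]

theorem foldl_max_max (a b : Int) (t : List Int) :
    t.foldl max (max a b) = max a (t.foldl max b) := by
  induction t generalizing b with
  | nil => rfl
  | cons y ys ih => simp only [List.foldl_cons, max_assoc]; exact ih _

theorem pymax_append_singleton (l : List Int) (v : Int) (h : l ≠ []) :
    pymax (l ++ [v]) = max (pymax l) v := by
  cases l with
  | nil => exact absurd rfl h
  | cons x t =>
    simp only [List.cons_append, pymax_cons, List.foldl_append, List.foldl_cons, List.foldl_nil]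

-- The B-side fold step.
def bstep (p : Int × Int) (v : Int) : Int × Int := if v > p.2 then (p.1 + 1, v) else p

-- Combined invariant tying A's (prev, seen) fold to B's (seen, run) fold.
theorem fold_inv (vs : List Int) (prev : List Int) (seen run : Int)
    (hne : prev ≠ []) (hmax : pymax prev = run) :
    (vs.foldl
      (fun (st : List Int × Int) val =>
        (st.1 ++ [val], if val > (PySem.List.max? st.1 (fun y => y)).getD 0 then st.2 + 1 else st.2))
      (prev, seen)).2
      = (vs.foldl bstep (seen, run)).1
    ∧ pymax (vs.foldl
      (fun (st : List Int × Int) val =>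
        (st.1 ++ [val], if val > (PySem.List.max? st.1 (fun y => y)).getD 0 then st.2 + 1 else st.2))
      (prev, seen)).1
      = (vs.foldl bstep (seen, run)).2 := by
  induction vs generalizing prev seen run with
  | nil => exact ⟨rfl, hmax⟩
  | cons v t ih =>
    have hm : (PySem.List.max? prev (fun y => y)).getD 0 = run := hmax
    have hne' : prev ++ [v] ≠ [] := by simp
    have hmax' : pymax (prev ++ [v]) = (bstep (seen, run) v).2 := by
      rw [pymax_append_singleton prev v hne, hmax, bstep]
      by_cases h : v > run <;> simp [h] <;> omega
    simp only [List.foldl_cons, hm, bstep]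
    by_cases h : v > run
    · simp only [if_pos h]
      exact ih (prev ++ [v]) (seen + 1) v hne' (by simpa [bstep, if_pos h] using hmax')
    · simp only [if_neg h]
      exact ih (prev ++ [v]) seen run hne' (by simpa [bstep, if_neg h] using hmax')

-- Monotonicity of the B fold: the count never drops, the running max never drops,
-- and if the count grew the running max is positive.
theorem bfold_mono (vs : List Int) (seen run : Int) (h0 : 0 ≤ run) :
    seen ≤ (vs.foldl bstep (seen, run)).1
    ∧ run ≤ (vs.foldl bstep (seen, run)).2
    ∧ (seen < (vs.foldl bstep (seen, run)).1 → 0 < (vs.foldl bstep (seen, run)).2) := by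
  induction vs generalizing seen run with
  | nil =>
    simp only [List.foldl_nil]
    exact ⟨le_refl _, le_refl _, fun h => absurd h (lt_irrefl _)⟩
  | cons v t ih =>
    simp only [List.foldl_cons, bstep]
    by_cases h : v > run
    · simp only [if_pos h]
      have := ih (seen + 1) v (by omega)
      exact ⟨by omega, by omega, fun _ => by omega⟩
    · simp only [if_neg h]
      exact ih seen run h0

-- If the overall running max (seeded with 0) is positive, it equals Python's max(inserted).
theorem pymax_of_pos (l : List Int) (h : 0 < pymax (0 :: l)) :
    (PySem.List.max? l (fun y => y)).getD 0 = pymax (0 :: l) := by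
  cases l with
  | nil => simp [pymax, PySem.List.max?] at h
  | cons x t =>
    have h1 : pymax (0 :: x :: t) = max 0 (t.foldl max x) := by
      rw [pymax_cons]
      simpa using foldl_max_max 0 x t
    show pymax (x :: t) = _
    rw [pymax_cons, h1]
    rw [h1] at h
    omega

-- Repeated list.remove on a duplicate-free list is a filter.
theorem foldl_remove_eq_filter (vs : List Int) (l : List Int) (hnd : l.Nodup) :
    vs.foldl (fun acc val => (PySem.List.remove? acc val).getD acc) l
      = l.filter (fun x => !(vs.contains x)) := by
  induction vs generalizing l with
  | nil => simp
  | cons v t ih =>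
    simp only [List.foldl_cons]
    have hstep : (PySem.List.remove? l v).getD l = l.filter (fun x => x != v) := by
      by_cases hv : v ∈ l
      · rw [PySem.List.remove?_eq_some_erase l v hv]
        simpa using hnd.erase_eq_filter v
      · rw [(PySem.List.remove?_eq_none_iff (xs := l) (v := v)).2 hv]
        simp only [Option.getD_none]
        symm
        apply List.filter_eq_self.2
        intro a ha
        simp only [bne_iff_ne, ne_eq]
        exact fun hav => hv (hav ▸ ha)
    rw [hstep, ih _ (hnd.filter _), List.filter_filter]
    apply List.filter_congr
    intro a _
    by_cases h1 : a = v <;> by_cases h2 : a ∈ t <;> simp [h1, h2]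

-- A's final loop when no available value exceeds the max: it adds 1 per element.
theorem foldl_count_all_le (l : List Int) (m c : Int) (h : ∀ x ∈ l, ¬ x > m) :
    l.foldl (fun count val => if val > m then (1 : Int) else count + 1) c = c + l.length := by
  induction l generalizing c with
  | nil => simp
  | cons x t ih =>
    simp only [List.foldl_cons, if_neg (h x (List.mem_cons_self))]
    rw [ih _ (fun y hy => h y (List.mem_cons_of_mem _ hy))]
    simp only [List.length_cons]
    push_cast
    omega

-- A's final loop when every element exceeds the max: each step resets to 1.
theorem foldl_count_all_gt (l : List Int) (m c : Int) (hne : l ≠ []) (h : ∀ x ∈ l, x > m) :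
    l.foldl (fun count val => if val > m then (1 : Int) else count + 1) c = 1 := by
  induction l generalizing c with
  | nil => exact absurd rfl hne
  | cons x t ih =>
    simp only [List.foldl_cons, if_pos (h x (List.mem_cons_self))]
    cases t with
    | nil => simp
    | cons y u => exact ih _ (by simp) (fun z hz => h z (List.mem_cons_of_mem _ hz))

-- ===== VERDICT (by name: the statement is the Claim_ definition above) =====
theorem max_possible_reversed_spec : Claim_equal_max_possible_reversed := by
  intro inserted _
  unfold Spec_max_possible_reversed max_possible_reversed max_possible_reversed_alt
    piramid_checker available_values
  set bres := inserted.foldl (fun (p : Int × Int) v => if v > p.2 then (p.1 + 1, v) else p) (0, 0)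
    with hbres
  have hbre : bres = inserted.foldl bstep (0, 0) := by
    rw [hbres]; rfl
  have hinv := fold_inv inserted [0] 0 0 (by simp) (by simp [pymax, PySem.List.max?])
  have hmono := bfold_mono inserted 0 0 (le_refl 0)
  rw [← hbre] at hinv hmono
  -- A's count equals B's seen
  rw [hinv.1]
  by_cases hz : bres.1 = 0
  · simp [hz]
  · have hseenpos : 0 < bres.1 := by
      rcases hmono with ⟨h1, _, _⟩; omega
    have hrunpos : 0 < bres.2 := by
      rcases hmono with ⟨h1, _, h3⟩; exact h3 (by omega)
    -- A's max(inserted) equals B's running max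
    have hposmax : 0 < pymax ((inserted.foldl
        (fun (st : List Int × Int) val =>
          (st.1 ++ [val], if val > (PySem.List.max? st.1 (fun y => y)).getD 0 then st.2 + 1 else st.2))
          ([0], 0)).1) := hinv.2 ▸ hrunpos
    have hprev : (inserted.foldl
        (fun (st : List Int × Int) val =>
          (st.1 ++ [val], if val > (PySem.List.max? st.1 (fun y => y)).getD 0 then st.2 + 1 else st.2))
          ([0], 0)).1 = 0 :: inserted := by
      clear hinv hmono hposmax
      suffices h : ∀ (vs prev : List Int) (s : Int), (vs.foldl
        (fun (st : List Int × Int) val =>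
          (st.1 ++ [val], if val > (PySem.List.max? st.1 (fun y => y)).getD 0 then st.2 + 1 else st.2))
          (prev, s)).1 = prev ++ vs by
        simpa using h inserted [0] 0
      intro vs
      induction vs with
      | nil => simp
      | cons v t ih => intro prev s; simp [ih]
    rw [hprev] at hposmax hinv
    have hmaxeq : (PySem.List.max? inserted (fun y => y)).getD 0 = bres.2 := by
      rw [pymax_of_pos inserted hposmax, hinv.2]
    have havail : inserted.foldl (fun acc val => (PySem.List.remove? acc val).getD acc)
        (PySem.List.pyRange 1 ((inserted.length : Int) + 1) 1)
        = (PySem.List.pyRange 1 ((inserted.length : Int) + 1) 1).filter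
            (fun x => !(inserted.contains x)) := by
      exact foldl_remove_eq_filter inserted _ (PySem.List.nodup_pyRange_one _ _)
    have hsf : ∀ (r : List Int),
        r.filter (fun x => !(PySem.Set.contains (PySem.Set.ofList inserted) x))
          = r.filter (fun x => !(inserted.contains x)) := by
      intro r
      apply List.filter_congr
      intro a _
      have h1 : PySem.Set.contains (PySem.Set.ofList inserted) a = inserted.contains a := by
        by_cases h : a ∈ inserted <;>
          simp [PySem.Set.mem_ofList, h, List.contains_eq_mem]
      rw [h1]
    simp only [if_neg hz, havail, hmaxeq, hsf]
    by_cases hgt : (inserted.length : Int) > bres.2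
    · -- some available value exceeds the max: A's loop ends at 1
      rw [if_pos hgt]
      have hsplit : PySem.List.pyRange 1 ((inserted.length : Int) + 1) 1
          = PySem.List.pyRange 1 (bres.2 + 1) 1
            ++ PySem.List.pyRange (bres.2 + 1) ((inserted.length : Int) + 1) 1 :=
        PySem.List.pyRange_one_append 1 (bres.2 + 1) ((inserted.length : Int) + 1)
          (by omega) (by omega)
      rw [hsplit, List.filter_append, List.foldl_append]
      -- every element of the high range is above the max of inserted, hence not in it
      have hmax' : ∀ y ∈ inserted, y ≤ bres.2 := by
        intro y hy
        cases hmx : PySem.List.max? inserted (fun y => y) with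
        | none =>
          rw [PySem.List.max?_eq_none_iff] at hmx
          rw [hmx] at hy; cases hy
        | some m =>
          have hm : m = bres.2 := by rw [hmx] at hmaxeq; simpa using hmaxeq
          have := PySem.List.max?_isMax hmx y hy
          simpa [hm] using this
      have hkeep : (PySem.List.pyRange (bres.2 + 1) ((inserted.length : Int) + 1) 1).filter
          (fun x => !(inserted.contains x))
          = PySem.List.pyRange (bres.2 + 1) ((inserted.length : Int) + 1) 1 := by
        apply List.filter_eq_self.2
        intro a ha
        rw [PySem.List.mem_pyRange_one] at ha
        simp only [Bool.not_eq_eq_eq_not, Bool.not_true, List.contains_eq_mem,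
          decide_eq_false_iff_not]
        intro hmem
        have := hmax' a hmem
        omega
      rw [hkeep]
      apply foldl_count_all_gt
      · rw [PySem.List.pyRange_one_cons (by omega)]; simp
      · intro x hx
        rw [PySem.List.mem_pyRange_one] at hx
        omega
    · -- no available value exceeds the max: A adds one per available value
      rw [if_neg hgt]
      apply foldl_count_all_le
      intro x hx
      have hx' := List.mem_filter.1 hx
      rw [PySem.List.mem_pyRange_one] at hx'
      omega
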